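-- pv_equiv track=rewrite | github.com/thingsbyfilip/nope | ascii_level_example.py | get_ascii_map
-- ===== SOURCE A (Python) =====
-- def get_ascii_map(source_map, tiles_to_ascii):
-- 	#extra function for converting map into ASCII string based on conversion table
-- 	#x and y axes must be swapped while 'drawing' map with text
--
-- 	tile_conversion_keys = set(tiles_to_ascii.keys())
-- 	w = len(source_map)
-- 	h = len(source_map[0])
--
-- 	ascii_map = ""
-- 	for y in range(0, h):
-- 		for x in range(0, w):
-- 			tile = source_map[x][y]
-- 			if tile in tile_conversion_keys:
-- 				ascii_map += tiles_to_ascii[tile]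
-- 			else:
-- 				ascii_map += tiles_to_ascii['other']
-- 		if y != h-1:
-- 			ascii_map += '\n'
--
-- 	return ascii_map
-- ===== SOURCE B (Python) =====
-- def get_ascii_map(source_map, tiles_to_ascii):
--     # column-peeling: reverse each source row once, then repeatedly pop the
--     # last element (O(1)) off every reversed row, emitting one output line
--     # per peel, until the first row is exhausted; no index arithmetic, no zip
--     def conv(t):
--         return tiles_to_ascii[t] if t in tiles_to_ascii else tiles_to_ascii['other']
--     rows = [list(reversed(r)) for r in source_map]
--     lines = []
--     while rows[0]:
--         lines.append(''.join(conv(r.pop()) for r in rows))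
--     return '\n'.join(lines)
-- ===== Notes on version B (the rewrite author's own statement) =====
-- stated objective: alternative
-- what changed: B replaces A's x/y index loops with column peeling: each source row is reversed once and the loop repeatedly pops the last element off every reversed row, emitting one output line per peel until the first row is exhausted, joining the collected lines at the end.
import Mathlib
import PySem

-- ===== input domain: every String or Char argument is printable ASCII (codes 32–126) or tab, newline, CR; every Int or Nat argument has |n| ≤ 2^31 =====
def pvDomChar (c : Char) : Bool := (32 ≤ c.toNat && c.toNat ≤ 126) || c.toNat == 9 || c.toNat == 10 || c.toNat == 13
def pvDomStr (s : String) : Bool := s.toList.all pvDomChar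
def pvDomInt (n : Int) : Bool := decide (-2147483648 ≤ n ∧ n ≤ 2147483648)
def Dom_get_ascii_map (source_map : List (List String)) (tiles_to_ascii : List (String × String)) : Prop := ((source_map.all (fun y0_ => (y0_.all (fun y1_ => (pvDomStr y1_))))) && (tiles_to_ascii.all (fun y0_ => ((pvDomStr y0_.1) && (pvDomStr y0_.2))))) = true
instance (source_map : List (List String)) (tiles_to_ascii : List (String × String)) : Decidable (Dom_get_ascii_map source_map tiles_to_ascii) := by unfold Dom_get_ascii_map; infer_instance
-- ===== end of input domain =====

-- B replaces A's x/y index loops and manual newline accumulation with column peeling: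
-- each source row is reversed once and its last element popped off per emitted line (objective: alternative).

-- ===== PORT A =====
def get_ascii_map (source_map : List (List String)) (tiles_to_ascii : List (String × String)) : String :=
  let d := PySem.Dict.mk tiles_to_ascii
  let tile_conversion_keys := PySem.Set.ofList (PySem.Dict.keys d)
  let w : Int := PySem.List.len source_map
  let h : Int := PySem.List.len (PySem.List.pyGetD source_map 0 [])  -- source_map[0]; IndexError (empty map) excluded by Pre_
  (PySem.List.pyRange 0 h).foldl (fun ascii_map y =>
    let ascii_map :=
      (PySem.List.pyRange 0 w).foldl (fun ascii_map x =>
        -- source_map[x][y]; IndexError (row shorter than the first) excluded by Pre_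
        let tile := PySem.List.pyGetD (PySem.List.pyGetD source_map x []) y ""
        if tile ∈ tile_conversion_keys then
          ascii_map ++ PySem.Dict.getD d tile ""      -- tiles_to_ascii[tile]; key present by the branch
        else
          ascii_map ++ PySem.Dict.getD d "other" ""   -- tiles_to_ascii['other']; KeyError excluded by Pre_
        ) ascii_map
    if y ≠ h - 1 then ascii_map ++ "\n" else ascii_map) ""

-- ===== PORT B =====
-- tiles_to_ascii[t] if t in tiles_to_ascii else tiles_to_ascii['other']  (KeyError excluded by Pre_)
def pyConvTile (tiles_to_ascii : List (String × String)) (t : String) : String :=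
  if PySem.Dict.contains (PySem.Dict.mk tiles_to_ascii) t then
    PySem.Dict.getD (PySem.Dict.mk tiles_to_ascii) t ""
  else
    PySem.Dict.getD (PySem.Dict.mk tiles_to_ascii) "other" ""

-- Source B's while loop: while rows[0] is nonempty, emit one line by popping the last
-- element off every (reversed) row; pop = getLast + dropLast.  pop() on an empty
-- non-first row would raise IndexError in Python — excluded by Pre_ (port reads "" there).
def bPeel (tiles_to_ascii : List (String × String)) (rows : List (List String)) : List String :=
  if rows.headI = [] then []
  else
    PySem.Str.join "" (rows.map (fun r => pyConvTile tiles_to_ascii (r.getLast?.getD ""))) ::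
      bPeel tiles_to_ascii (rows.map (fun r => r.dropLast))
termination_by rows.headI.length
decreasing_by
  rename_i h
  cases rows with
  | nil => exact absurd rfl h
  | cons x xs =>
    have hx : 0 < x.length := List.length_pos_iff.2 (by simpa [List.headI] using h)
    simp [List.headI, List.length_dropLast]; omega

def get_ascii_map_alt (source_map : List (List String)) (tiles_to_ascii : List (String × String)) : String :=
  let rows := source_map.map List.reverse     -- rows = [list(reversed(r)) for r in source_map]
  PySem.Str.join "\n" (bPeel tiles_to_ascii rows)

-- ===== PRECONDITION & SPEC =====
-- Pre_ excludes exactly the inputs on which the Python A raises: an empty map (IndexError on source_map[0]),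
-- a row shorter than the first row (IndexError on source_map[x][y]), and a scanned tile missing from the
-- table while 'other' is also missing (KeyError).
def Pre_get_ascii_map (source_map : List (List String)) (tiles_to_ascii : List (String × String)) : Prop :=
  source_map ≠ [] ∧
  (∀ row ∈ source_map, (source_map.headI).length ≤ row.length) ∧
  (∀ row ∈ source_map, ∀ t ∈ row.take (source_map.headI).length,
    PySem.Dict.contains (PySem.Dict.mk tiles_to_ascii) t = true ∨
    PySem.Dict.contains (PySem.Dict.mk tiles_to_ascii) "other" = true)

instance (source_map : List (List String)) (tiles_to_ascii : List (String × String)) : Decidable (Pre_get_ascii_map source_map tiles_to_ascii) := by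
  unfold Pre_get_ascii_map; infer_instance

def pvWitness_get_ascii_map : List (List String) × (List (String × String)) :=
  ([["g", "w"], ["w", "x"]], [("g", "."), ("w", "#"), ("other", "?")])

def Spec_get_ascii_map (source_map : List (List String)) (tiles_to_ascii : List (String × String)) (out : String) : Prop := out = get_ascii_map_alt source_map tiles_to_ascii
instance (source_map : List (List String)) (tiles_to_ascii : List (String × String)) (out : String) : Decidable (Spec_get_ascii_map source_map tiles_to_ascii out) := by unfold Spec_get_ascii_map; infer_instance

-- ===== CLAIM (what is proved, stated in full; the proofs are below) =====
def Claim_equal_get_ascii_map : Prop := ∀ (source_map : List (List String)) (tiles_to_ascii : List (String × String)), Dom_get_ascii_map source_map tiles_to_ascii → Pre_get_ascii_map source_map tiles_to_ascii → Spec_get_ascii_map source_map tiles_to_ascii (get_ascii_map source_map tiles_to_ascii)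

-- ===== LEMMAS AND PROOFS =====

theorem strJoin_nil (sep : String) : PySem.Str.join sep [] = "" := by
  rw [← String.toList_inj]; simp [PySem.Str.toList_join, PySem.Chars.join_nil]

theorem charsJoin_nil_cons (a : List Char) (l : List (List Char)) :
    PySem.Chars.join [] (a :: l) = a ++ PySem.Chars.join [] l := by
  cases l with
  | nil => simp [PySem.Chars.join_singleton, PySem.Chars.join_nil]
  | cons b bs => simp [PySem.Chars.join_cons_cons]

theorem strJoin_nil_cons (a : String) (l : List String) :
    PySem.Str.join "" (a :: l) = a ++ PySem.Str.join "" l := by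
  rw [← String.toList_inj]
  simp [PySem.Str.toList_join, String.toList_append, charsJoin_nil_cons]

theorem charsJoin_last (ps : List (List Char)) (x : List Char) :
    PySem.Chars.join ['\n'] (ps ++ [x])
      = PySem.Chars.join [] (ps.map (fun p => p ++ ['\n'])) ++ x := by
  induction ps with
  | nil => simp [PySem.Chars.join_singleton, PySem.Chars.join_nil]
  | cons p ps ih =>
    obtain ⟨q, rest, hqr⟩ := List.exists_cons_of_ne_nil (l := ps ++ [x]) (by simp)
    rw [List.cons_append, hqr, PySem.Chars.join_cons_cons, ← hqr, ih,
      List.map_cons, charsJoin_nil_cons]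
    simp [List.append_assoc]

theorem strJoin_last (ps : List String) (x : String) :
    PySem.Str.join "\n" (ps ++ [x])
      = PySem.Str.join "" (ps.map (fun p => p ++ "\n")) ++ x := by
  rw [← String.toList_inj]
  have hsep : ("\n" : String).toList = ['\n'] := by decide
  have hnil : ("" : String).toList = [] := by decide
  simp only [PySem.Str.toList_join, String.toList_append, List.map_append, List.map_map,
    List.map_cons, List.map_nil, hsep, hnil]
  have := charsJoin_last (ps.map String.toList) x.toList
  simpa [List.map_map, Function.comp_def, String.toList_append, hsep] using this

-- accumulating string fold = init ++ ''.join
theorem foldl_str {α : Type} (g : α → String) (l : List α) (acc : String) :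
    l.foldl (fun am a => am ++ g a) acc = acc ++ PySem.Str.join "" (l.map g) := by
  induction l generalizing acc with
  | nil => simp [strJoin_nil, String.append_empty]
  | cons a t ih =>
    simp only [List.foldl_cons, List.map_cons, ih, strJoin_nil_cons]
    rw [String.append_assoc]

-- A's set-membership test agrees with B's containment test
theorem branch_eq (t2a : List (String × String)) (am t : String) :
    (if t ∈ PySem.Set.ofList (PySem.Dict.keys (PySem.Dict.mk t2a)) then
        am ++ PySem.Dict.getD (PySem.Dict.mk t2a) t ""
      else
        am ++ PySem.Dict.getD (PySem.Dict.mk t2a) "other" "")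
      = am ++ pyConvTile t2a t := by
  unfold pyConvTile
  by_cases hc : PySem.Dict.contains (PySem.Dict.mk t2a) t = true
  · rw [if_pos hc, if_pos ((PySem.Set.mem_ofList _ _).2 ((PySem.Dict.contains_iff_mem_keys _ _).1 hc))]
  · rw [if_neg hc,
      if_neg (fun hmem => hc ((PySem.Dict.contains_iff_mem_keys _ _).2 ((PySem.Set.mem_ofList _ _).1 hmem)))]

-- A's inner loop over x produces one output row appended to the accumulator
theorem innerA_eq (sm : List (List String)) (t2a : List (String × String)) (y : Int) (acc : String) :
    (PySem.List.pyRange 0 (↑sm.length)).foldl (fun ascii_map x =>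
        let tile := PySem.List.pyGetD (PySem.List.pyGetD sm x []) y ""
        if tile ∈ PySem.Set.ofList (PySem.Dict.keys (PySem.Dict.mk t2a)) then
          ascii_map ++ PySem.Dict.getD (PySem.Dict.mk t2a) tile ""
        else
          ascii_map ++ PySem.Dict.getD (PySem.Dict.mk t2a) "other" "") acc
      = acc ++ PySem.Str.join "" (sm.map (fun row => pyConvTile t2a (PySem.List.pyGetD row y ""))) := by
  simp only [branch_eq]
  rw [PySem.List.foldl_pyRange_zero_pyGetD' sm []
    (fun am row => am ++ pyConvTile t2a (PySem.List.pyGetD row y ""))]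
  exact foldl_str _ _ _

-- A's outer loop over y with its conditional newline is '\n'.join of the rows
theorem outerA_eq (J : Int → String) (JN : Nat → String) (hJ : ∀ k : Nat, JN k = J ↑k) (n : Nat) :
    (PySem.List.pyRange 0 (↑n)).foldl
        (fun am y => if y ≠ (↑n : Int) - 1 then (am ++ J y) ++ "\n" else am ++ J y) ""
      = PySem.Str.join "\n" ((List.range n).map JN) := by
  rw [PySem.List.pyRange_one, List.foldl_map]
  simp only [Int.sub_zero, Int.toNat_natCast, zero_add, ← hJ]
  cases n with
  | zero => simp [strJoin_nil]
  | succ m =>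
    rw [List.range_succ, List.foldl_append,
      PySem.List.foldl_congr_mem (List.range m)
        (fun am k => if (↑k : Int) ≠ (↑(m + 1) : Int) - 1 then (am ++ JN k) ++ "\n" else am ++ JN k)
        (fun am k => am ++ (JN k ++ "\n")) ""
        (by
          intro acc k hk
          have hk' : k < m := List.mem_range.1 hk
          show (if (↑k : Int) ≠ (↑(m + 1) : Int) - 1 then (acc ++ JN k) ++ "\n" else acc ++ JN k)
            = acc ++ (JN k ++ "\n")
          rw [if_pos (by push_cast; omega), String.append_assoc]),
      foldl_str (α := ℕ) (fun k => JN k ++ "\n") (List.range m) ""]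
    simp only [List.foldl_cons, List.foldl_nil]
    rw [if_neg (by push_cast; omega)]
    simp only [List.map_append, List.map_cons, List.map_nil]
    rw [strJoin_last]
    simp [List.map_map, Function.comp_def, String.empty_append]

theorem A_eq (r : List String) (rs : List (List String)) (t2a : List (String × String)) :
    get_ascii_map (r :: rs) t2a
      = PySem.Str.join "\n" ((List.range r.length).map (fun i =>
          PySem.Str.join "" ((r :: rs).map (fun row => pyConvTile t2a (row.getD i ""))))) := by
  unfold get_ascii_map
  simp only [PySem.List.pyGetD_zero_cons, PySem.List.len_eq, innerA_eq]
  rw [outerA_eq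
    (fun y => PySem.Str.join "" ((r :: rs).map (fun row => pyConvTile t2a (PySem.List.pyGetD row y ""))))
    (fun i => PySem.Str.join "" ((r :: rs).map (fun row => pyConvTile t2a (row.getD i ""))))
    (fun k => by simp only [PySem.List.pyGetD_natCast]) r.length]

-- B's peeling loop, applied to the reversed rows, produces exactly the indexed output rows
theorem bPeel_eq (t2a : List (String × String)) (n : Nat) :
    ∀ (rows : List (List String)), rows ≠ [] → (∀ row ∈ rows, n ≤ row.length) →
      rows.headI.length = n →
      bPeel t2a (rows.map List.reverse)
        = (List.range n).map (fun i =>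
            PySem.Str.join "" (rows.map (fun row => pyConvTile t2a (row.getD i "")))) := by
  induction n with
  | zero =>
    intro rows hne _ hh
    obtain ⟨r, rs, rfl⟩ := List.exists_cons_of_ne_nil hne
    have hr : r = [] := List.eq_nil_of_length_eq_zero (by simpa [List.headI] using hh)
    rw [bPeel]
    simp [hr, List.headI]
  | succ m ih =>
    intro rows hne hlen hh
    obtain ⟨r, rs, rfl⟩ := List.exists_cons_of_ne_nil hne
    have hr : r ≠ [] := by
      intro h; rw [h] at hh; simp [List.headI] at hh
    rw [bPeel]
    rw [if_neg (by simp [List.headI]; exact fun h => hr (by simpa using congrArg List.reverse h))]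
    have hline : ((r :: rs).map List.reverse).map (fun c => pyConvTile t2a (c.getLast?.getD ""))
        = (r :: rs).map (fun row => pyConvTile t2a (row.getD 0 "")) := by
      rw [List.map_map]
      exact List.map_congr_left (fun row _ => by
        simp [List.getLast?_reverse, List.head?_eq_getElem?, List.getD])
    have htails : ((r :: rs).map List.reverse).map (fun c => c.dropLast)
        = ((r :: rs).map List.tail).map List.reverse := by
      simp only [List.map_map]
      exact List.map_congr_left (fun row _ => by simp [List.dropLast_reverse])
    simp only [List.map_map] at hline htails ⊢
    rw [hline, htails, ← List.map_map]
    rw [ih ((r :: rs).map List.tail) (by simp)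
      (by
        intro row hrow
        obtain ⟨row0, hrow0, rfl⟩ := List.mem_map.1 hrow
        have := hlen row0 hrow0
        simp [List.length_tail]; omega)
      (by simp only [List.map_cons, List.headI, List.length_tail]
          simp only [List.headI] at hh; omega)]
    simp only [List.range_succ_eq_map, List.map_cons, List.map_map, Function.comp_def]
    congr 1
    refine List.map_congr_left (fun i _ => ?_)
    have key : ∀ row : List String, row ≠ [] →
        pyConvTile t2a (row.tail.getD i "") = pyConvTile t2a (row.getD i.succ "") := by
      intro row hrne
      obtain ⟨a, t, rfl⟩ := List.exists_cons_of_ne_nil hrne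
      simp [List.getD]
    congr 1
    congr 1
    · exact key r hr
    · refine List.map_congr_left (fun row hrow => key row ?_)
      have := hlen row (List.mem_cons_of_mem _ hrow)
      intro h; rw [h] at this; simp at this

theorem B_eq (r : List String) (rs : List (List String)) (t2a : List (String × String))
    (h : ∀ row ∈ r :: rs, r.length ≤ row.length) :
    get_ascii_map_alt (r :: rs) t2a
      = PySem.Str.join "\n" ((List.range r.length).map (fun i =>
          PySem.Str.join "" ((r :: rs).map (fun row => pyConvTile t2a (row.getD i ""))))) := by
  show PySem.Str.join "\n" (bPeel t2a ((r :: rs).map List.reverse)) = _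
  rw [bPeel_eq t2a r.length (r :: rs) (by simp) h (by simp [List.headI])]

-- ===== VERDICT (by name: the statement is the Claim_ definition above) =====
theorem get_ascii_map_spec : Claim_equal_get_ascii_map := by
  intro sm t2a _hdom hpre
  obtain ⟨hne, hlen, -⟩ := hpre
  unfold Spec_get_ascii_map
  cases sm with
  | nil => exact absurd rfl hne
  | cons r rs =>
    rw [A_eq, B_eq r rs t2a (by simpa using hlen)]
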